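-- pv_equiv track=rewrite | github.com/NoMoreActimel/agentic-rag-search | src/indexing/chunker.py | _hard_split_long_sentence
-- ===== SOURCE A (Python) =====
-- def _hard_split_long_sentence(sentence: str, max_len: int) -> list[str]:
--     """Split a sentence that exceeds max_len at word boundaries (fallback to char-level)."""
--     if len(sentence) <= max_len:
--         return [sentence]
--     pieces: list[str] = []
--     words = sentence.split(" ")
--     buf: list[str] = []
--     buf_len = 0
--     for w in words:
--         add_len = len(w) + (1 if buf else 0)
--         if buf and buf_len + add_len > max_len:
--             pieces.append(" ".join(buf))
--             buf, buf_len = [w], len(w)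
--         else:
--             buf.append(w)
--             buf_len += add_len
--     if buf:
--         pieces.append(" ".join(buf))
--     # If a single word was longer than max_len, char-split the oversized pieces.
--     final: list[str] = []
--     for p in pieces:
--         if len(p) <= max_len:
--             final.append(p)
--         else:
--             for i in range(0, len(p), max_len):
--                 final.append(p[i : i + max_len])
--     return final
-- ===== SOURCE B (Python) =====
-- def _hard_split_long_sentence(sentence: str, max_len: int) -> list[str]:
--     """Greedy group-taking: repeatedly take the longest prefix of words that
--     fits in max_len (char-chunking an oversized head word), no running buffer."""
--     if len(sentence) <= max_len:
--         return [sentence]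
--     words = sentence.split(" ")
--     out: list[str] = []
--     i = 0
--     n = len(words)
--     while i < n:
--         w = words[i]
--         if len(w) > max_len:
--             out.extend(w[k : k + max_len] for k in range(0, len(w), max_len))
--             i += 1
--         else:
--             j = i + 1
--             cur = len(w)
--             while j < n and cur + len(words[j]) + 1 <= max_len:
--                 cur += len(words[j]) + 1
--                 j += 1
--             out.append(" ".join(words[i:j]))
--             i = j
--     return out
-- ===== Notes on version B (the rewrite author's own statement) =====
-- stated objective: alternative
-- what changed: B replaces A's two sequential passes and running buffer (greedy word-packing fold, then a rescan that char-splits oversized pieces) with greedy group-taking over an index: repeatedly take the longest prefix of the remaining words that fits in max_len and join it (char-chunking an oversized head word on the spot), so neither A's buffer state machine nor its second pass exists in B.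
import Mathlib
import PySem

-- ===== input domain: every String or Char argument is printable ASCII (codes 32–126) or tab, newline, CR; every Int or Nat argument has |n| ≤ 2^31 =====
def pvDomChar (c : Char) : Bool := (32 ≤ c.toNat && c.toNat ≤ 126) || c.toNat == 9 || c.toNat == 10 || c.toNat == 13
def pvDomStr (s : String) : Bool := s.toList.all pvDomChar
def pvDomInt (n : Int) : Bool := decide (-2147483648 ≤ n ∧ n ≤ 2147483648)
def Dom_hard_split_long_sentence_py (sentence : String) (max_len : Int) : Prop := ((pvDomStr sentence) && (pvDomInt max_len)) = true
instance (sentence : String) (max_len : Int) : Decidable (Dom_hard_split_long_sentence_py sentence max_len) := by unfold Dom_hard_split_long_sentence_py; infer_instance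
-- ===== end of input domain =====

-- B replaces A's pack-then-rescan two-pass structure (running buffer fold, then a
-- char-splitting rescan) by greedy group-taking: repeatedly take the longest prefix
-- of the remaining words that fits; same return value (objective: alternative).

-- ===== PORT A =====
-- 'for i in range(0, len(p), max_len): final.append(p[i:i+max_len])'
def pvChunksA (p : String) (max_len : Int) : List String :=
  (PySem.List.pyRange 0 (PySem.Str.len p) max_len).foldl
    (fun acc i => acc ++ [PySem.Str.slice p (some i) (some (i + max_len))]) []

-- one iteration of A's greedy word-packing loop; state = (pieces, buf, buf_len)
def pvStepA (max_len : Int) (s : List String × List String × Int) (w : String) :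
    List String × List String × Int :=
  let (pieces, buf, buf_len) := s
  let add_len := PySem.Str.len w + (if buf ≠ [] then 1 else 0)
  if buf ≠ [] ∧ buf_len + add_len > max_len then
    (pieces ++ [PySem.Str.join " " buf], [w], PySem.Str.len w)
  else
    (pieces, buf ++ [w], buf_len + add_len)

-- trailing 'if buf: pieces.append(" ".join(buf))'
def pvFlush (s : List String × List String × Int) : List String :=
  if s.2.1 ≠ [] then s.1 ++ [PySem.Str.join " " s.2.1] else s.1

-- A's second pass: char-split the oversized pieces
def pvCharPass (max_len : Int) (pieces : List String) : List String :=
  pieces.foldl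
    (fun final p =>
      if PySem.Str.len p ≤ max_len then final ++ [p] else final ++ pvChunksA p max_len) []

def hard_split_long_sentence_py (sentence : String) (max_len : Int) : List String :=
  if PySem.Str.len sentence ≤ max_len then [sentence]
  else
    let words := (PySem.Str.split? sentence " ").getD []   -- sep ≠ "", so split? is some
    pvCharPass max_len (pvFlush (words.foldl (pvStepA max_len) ([], [], 0)))

-- ===== PORT B =====
-- B's comprehension '[w[k:k+max_len] for k in range(0, len(w), max_len)]'
def pvChunksB (w : String) (max_len : Int) : List String :=
  (PySem.List.pyRange 0 (PySem.Str.len w) max_len).map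
    (fun k => PySem.Str.slice w (some k) (some (k + max_len)))

-- B's inner while loop: extend the group while the next word still fits;
-- returns (words taken, remaining words)
def pvTake (m : Int) : Int → List String → List String × List String
  | _, [] => ([], [])
  | cur, w :: ws =>
    if cur + PySem.Str.len w + 1 ≤ m then
      let p := pvTake m (cur + PySem.Str.len w + 1) ws
      (w :: p.1, p.2)
    else ([], w :: ws)

theorem pvTake_rest_len (m : Int) (cur : Int) (ws : List String) :
    (pvTake m cur ws).2.length ≤ ws.length := by
  induction ws generalizing cur with
  | nil => simp [pvTake]
  | cons w ws ih =>
    simp only [pvTake]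
    split
    · exact Nat.le_succ_of_le (ih _)
    · simp

-- B's outer while loop over the remaining words
def pvGo (m : Int) : List String → List String
  | [] => []
  | w :: ws =>
    if PySem.Str.len w > m then
      pvChunksB w m ++ pvGo m ws
    else
      let p := pvTake m (PySem.Str.len w) ws
      PySem.Str.join " " (w :: p.1) :: pvGo m p.2
termination_by ws => ws.length
decreasing_by
  · simp
  · have := pvTake_rest_len m (PySem.Str.len w) ws
    simp only [List.length_cons]
    omega

def hard_split_long_sentence_py_alt (sentence : String) (max_len : Int) : List String :=
  if PySem.Str.len sentence ≤ max_len then [sentence]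
  else pvGo max_len ((PySem.Str.split? sentence " ").getD [])

-- ===== PRECONDITION & SPEC =====
-- Pre_ excludes only inputs where Python A raises: max_len == 0 with some non-space
-- character in the sentence makes range(0, len(p), 0) raise ValueError (B raises there too).
def Pre_hard_split_long_sentence_py (sentence : String) (max_len : Int) : Prop :=
  max_len ≠ 0 ∨ sentence.toList.all (· = ' ') = true
instance (sentence : String) (max_len : Int) : Decidable (Pre_hard_split_long_sentence_py sentence max_len) := by unfold Pre_hard_split_long_sentence_py; infer_instance

def pvWitness_hard_split_long_sentence_py : String × Int := ("hello world this is long", 7)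

def Spec_hard_split_long_sentence_py (sentence : String) (max_len : Int) (out : List String) : Prop := out = hard_split_long_sentence_py_alt sentence max_len
instance (sentence : String) (max_len : Int) (out : List String) : Decidable (Spec_hard_split_long_sentence_py sentence max_len out) := by unfold Spec_hard_split_long_sentence_py; infer_instance

-- ===== CLAIM (what is proved, stated in full; the proofs are below) =====
def Claim_equal_hard_split_long_sentence_py : Prop := ∀ (sentence : String) (max_len : Int), Dom_hard_split_long_sentence_py sentence max_len → Pre_hard_split_long_sentence_py sentence max_len → Spec_hard_split_long_sentence_py sentence max_len (hard_split_long_sentence_py sentence max_len)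

-- ===== LEMMAS AND PROOFS =====

theorem pvLen_nonneg (s : String) : 0 ≤ PySem.Str.len s := by
  simp [PySem.Str.len_eq]

theorem pvJoin_single (w : String) : PySem.Str.join " " [w] = w := by
  apply String.toList_inj.mp
  simp [PySem.Str.toList_join, PySem.Chars.join_singleton]

theorem pvChars_join_append (sep : List Char) (b : List (List Char)) (w : List Char)
    (h : b ≠ []) :
    PySem.Chars.join sep (b ++ [w]) = PySem.Chars.join sep b ++ sep ++ w := by
  induction b with
  | nil => simp at h
  | cons p rest ih =>
    cases rest with
    | nil => simp [PySem.Chars.join_cons_cons, PySem.Chars.join_singleton]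
    | cons q rest' =>
      have := ih (by simp)
      simp only [List.cons_append, PySem.Chars.join_cons_cons] at this ⊢
      rw [this]
      simp [List.append_assoc]

theorem pvLen_join_append (b : List String) (w : String) (h : b ≠ []) :
    PySem.Str.len (PySem.Str.join " " (b ++ [w]))
      = PySem.Str.len (PySem.Str.join " " b) + 1 + PySem.Str.len w := by
  have hsep : (" " : String).toList = [' '] := by decide
  simp only [PySem.Str.len_eq, PySem.Str.toList_join, List.map_append, List.map_cons,
    List.map_nil, hsep]
  rw [pvChars_join_append _ _ _ (by simpa using h)]
  simp only [List.length_append, List.length_cons, List.length_nil]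
  push_cast
  ring

def pvCs1 (max_len : Int) (p : String) : List String :=
  if PySem.Str.len p ≤ max_len then [p] else pvChunksA p max_len

theorem pvCharPass_eq (max_len : Int) (pieces : List String) :
    pvCharPass max_len pieces = pieces.flatMap (pvCs1 max_len) := by
  unfold pvCharPass
  have : ∀ (final : List String) (p : String),
      (if PySem.Str.len p ≤ max_len then final ++ [p] else final ++ pvChunksA p max_len)
        = final ++ pvCs1 max_len p := by
    intro final p; unfold pvCs1; split_ifs <;> rfl
  calc pieces.foldl
        (fun final p =>
          if PySem.Str.len p ≤ max_len then final ++ [p] else final ++ pvChunksA p max_len) []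
      = pieces.foldl (fun final p => final ++ pvCs1 max_len p) [] := by
        apply PySem.List.foldl_congr_mem
        intro acc x _; exact this acc x
    _ = pieces.flatMap (pvCs1 max_len) := by
        simpa using PySem.List.foldl_append_eq_flatMap (pvCs1 max_len) pieces []

theorem pvCharPass_append_one (max_len : Int) (pieces : List String) (p : String) :
    pvCharPass max_len (pieces ++ [p]) = pvCharPass max_len pieces ++ pvCs1 max_len p := by
  simp [pvCharPass_eq]

-- the two chunk loops produce the same list
theorem pvChunks_eq (p : String) (m : Int) : pvChunksA p m = pvChunksB p m := by
  unfold pvChunksA pvChunksB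
  generalize PySem.List.pyRange 0 (PySem.Str.len p) m = r
  induction r using List.reverseRecOn with
  | nil => rfl
  | append_singleton r i ih => simp [ih]

-- step characterizations of A's loop
theorem pvStepA_empty (m : Int) (pa : List String) (la : Int) (w : String) :
    pvStepA m (pa, [], la) w = (pa, [w], la + PySem.Str.len w) := by
  simp [pvStepA]

theorem pvStepA_flush (m : Int) (pa b : List String) (la : Int) (w : String)
    (hb : b ≠ []) (hc : la + (PySem.Str.len w + 1) > m) :
    pvStepA m (pa, b, la) w
      = (pa ++ [PySem.Str.join " " b], [w], PySem.Str.len w) := by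
  simp only [pvStepA]
  rw [if_pos hb, if_pos ⟨hb, hc⟩]

theorem pvStepA_app (m : Int) (pa b : List String) (la : Int) (w : String)
    (hb : b ≠ []) (hc : ¬ la + (PySem.Str.len w + 1) > m) :
    pvStepA m (pa, b, la) w = (pa, b ++ [w], la + (PySem.Str.len w + 1)) := by
  simp only [pvStepA]
  rw [if_pos hb, if_neg (by rintro ⟨-, h2⟩; exact hc h2)]

-- the main coupling: A's flushed-and-rescanned fold equals B's group recursion,
-- stated for the three reachable shapes of A's state (empty buffer / a fitting
-- buffer / a single oversized word in the buffer)
theorem pvMain (m : Int) (ws : List String) :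
    (∀ pieces, pvCharPass m (pvFlush (ws.foldl (pvStepA m) (pieces, [], 0)))
        = pvCharPass m pieces ++ pvGo m ws)
    ∧ (∀ pieces buf l, buf ≠ [] → l = PySem.Str.len (PySem.Str.join " " buf) → l ≤ m →
        pvCharPass m (pvFlush (ws.foldl (pvStepA m) (pieces, buf, l)))
          = pvCharPass m pieces
            ++ (PySem.Str.join " " (buf ++ (pvTake m l ws).1) :: pvGo m (pvTake m l ws).2))
    ∧ (∀ pieces w0, PySem.Str.len w0 > m →
        pvCharPass m (pvFlush (ws.foldl (pvStepA m) (pieces, [w0], PySem.Str.len w0)))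
          = pvCharPass m pieces ++ pvChunksB w0 m ++ pvGo m ws) := by
  induction ws with
  | nil =>
    refine ⟨?_, ?_, ?_⟩
    · intro pieces
      simp [pvGo, pvFlush]
    · intro pieces buf l hb hl hle
      simp only [List.foldl_nil, pvFlush, ne_eq, hb, not_false_iff, if_pos]
      rw [pvCharPass_append_one]
      unfold pvCs1
      rw [if_pos (by rw [← hl]; exact hle)]
      simp [pvTake, pvGo]
    · intro pieces w0 hw0
      simp only [List.foldl_nil, pvFlush, ne_eq, if_pos (by simp : ([w0] : List String) ≠ [])]
      rw [pvCharPass_append_one, pvJoin_single]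
      unfold pvCs1
      rw [if_neg (by omega), pvChunks_eq]
      simp [pvGo]
  | cons w ws ih =>
    obtain ⟨ihE, ihS, ihO⟩ := ih
    have hw0 : 0 ≤ PySem.Str.len w := pvLen_nonneg w
    -- after one step landing in state ([w]) the rest is handled by S or O on ws
    have hafter : ∀ pieces',
        pvCharPass m (pvFlush (ws.foldl (pvStepA m) (pieces', [w], PySem.Str.len w)))
          = pvCharPass m pieces' ++ pvGo m (w :: ws) := by
      intro pieces'
      by_cases hw : PySem.Str.len w > m
      · rw [ihO pieces' w hw]
        simp only [pvGo, if_pos hw, List.append_assoc]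
      · rw [ihS pieces' [w] (PySem.Str.len w) (by simp) (by rw [pvJoin_single]) (by omega)]
        simp only [pvGo, if_neg hw, List.singleton_append]
    refine ⟨?_, ?_, ?_⟩
    · -- E: empty buffer
      intro pieces
      rw [List.foldl_cons, pvStepA_empty]
      rw [show (0 : Int) + PySem.Str.len w = PySem.Str.len w by omega]
      exact hafter pieces
    · -- S: fitting nonempty buffer
      intro pieces buf l hb hl hle
      have hl0 : 0 ≤ l := by rw [hl]; exact pvLen_nonneg _
      have hcs : pvCs1 m (PySem.Str.join " " buf) = [PySem.Str.join " " buf] := by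
        unfold pvCs1; rw [if_pos (by omega)]
      by_cases hc : l + PySem.Str.len w + 1 ≤ m
      · -- the word joins the group
        rw [List.foldl_cons, pvStepA_app m _ _ _ _ hb (by omega)]
        have hnew : l + (PySem.Str.len w + 1)
            = PySem.Str.len (PySem.Str.join " " (buf ++ [w])) := by
          rw [pvLen_join_append _ _ hb, ← hl]; ring
        rw [show l + (PySem.Str.len w + 1) = l + PySem.Str.len w + 1 by ring] at hnew ⊢
        rw [ihS pieces (buf ++ [w]) _ (by simp) hnew (by omega)]
        simp only [pvTake, if_pos hc, List.append_assoc, List.cons_append, List.nil_append]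
      · -- the word starts a new group: A flushes the buffer
        rw [List.foldl_cons, pvStepA_flush m _ _ _ _ hb (by omega)]
        rw [hafter (pieces ++ [PySem.Str.join " " buf]), pvCharPass_append_one, hcs]
        simp only [pvTake, if_neg hc, List.append_nil, List.append_assoc, List.cons_append,
          List.nil_append]
    · -- O: one oversized word in the buffer — A always flushes it alone
      intro pieces w0 hov
      rw [List.foldl_cons, pvStepA_flush m _ _ _ _ (by simp) (by omega)]
      rw [hafter (pieces ++ [PySem.Str.join " " [w0]]), pvCharPass_append_one, pvJoin_single]
      unfold pvCs1
      rw [if_neg (by omega), pvChunks_eq]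

-- ===== VERDICT (by name: the statement is the Claim_ definition above) =====
theorem hard_split_long_sentence_py_spec : Claim_equal_hard_split_long_sentence_py := by
  intro sentence max_len _ _
  unfold Spec_hard_split_long_sentence_py
  unfold hard_split_long_sentence_py hard_split_long_sentence_py_alt
  split_ifs with h
  · rfl
  · have := (pvMain max_len ((PySem.Str.split? sentence " ").getD [])).1 []
    simpa [pvCharPass] using this
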